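-- pv_equiv track=rewrite | github.com/ShahriarShovo/ielts_reading | reading/utils/answer_comparison.py | compare_multiple_answers
-- ===== SOURCE A (Python) =====
-- def compare_multiple_answers(student_answer, correct_answer):
--     """
--     Compare multiple choice answers with multiple correct options.
--
--     Args:
--         student_answer: Student's answer (e.g., "A,B" or "A, B")
--         correct_answer: Correct answer (e.g., "A,B" or "A, B")
--
--     Returns:
--         bool: True if answers match, False otherwise
--     """
--     # Split answers by comma
--     student_parts = [part.strip() for part in student_answer.split(',')]
--     correct_parts = [part.strip() for part in correct_answer.split(',')]
--
--     # Remove empty parts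
--     student_parts = [part for part in student_parts if part]
--     correct_parts = [part for part in correct_parts if part]
--
--     # Check if all parts match (order doesn't matter)
--     if len(student_parts) != len(correct_parts):
--         return False
--
--     return sorted(student_parts) == sorted(correct_parts)
-- ===== SOURCE B (Python) =====
-- def compare_multiple_answers(student_answer, correct_answer):
--     """Order-insensitive comparison via frequency dictionaries (no sorting)."""
--     def multiset(answer):
--         counts = {}
--         for part in answer.split(','):
--             part = part.strip()
--             if part:
--                 counts[part] = counts.get(part, 0) + 1
--         return counts
--
--     return multiset(student_answer) == multiset(correct_answer)
-- ===== Notes on version B (the rewrite author's own statement) =====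
-- stated objective: alternative
-- what changed: Replaces the sort-then-compare (plus a separate length check) by a single pass that builds a frequency dictionary per answer while parsing, and compares the two multisets with dict equality.
import Mathlib
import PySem

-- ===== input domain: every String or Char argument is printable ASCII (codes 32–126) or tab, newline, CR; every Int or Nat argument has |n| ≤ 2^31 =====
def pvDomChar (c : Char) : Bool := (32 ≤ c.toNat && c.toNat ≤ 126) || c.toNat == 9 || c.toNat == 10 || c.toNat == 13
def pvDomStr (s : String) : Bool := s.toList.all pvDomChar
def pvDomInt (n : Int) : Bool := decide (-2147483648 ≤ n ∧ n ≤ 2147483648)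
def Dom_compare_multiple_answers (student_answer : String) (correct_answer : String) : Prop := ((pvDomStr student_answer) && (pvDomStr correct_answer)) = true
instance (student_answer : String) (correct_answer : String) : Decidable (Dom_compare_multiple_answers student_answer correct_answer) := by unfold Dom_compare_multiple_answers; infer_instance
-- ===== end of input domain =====

-- B replaces A's sort-then-compare (with a separate length check) by one parsing pass
-- per answer that builds a frequency dictionary, comparing the two multisets (objective: alternative).

-- ===== PORT A =====
def compare_multiple_answers (student_answer : String) (correct_answer : String) : Bool :=
  -- student_answer.split(',') : ',' is a nonempty separator, so split? always returns some
  let student_parts := ((PySem.Str.split? student_answer ",").getD []).map PySem.Str.strip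
  let correct_parts := ((PySem.Str.split? correct_answer ",").getD []).map PySem.Str.strip
  -- [part for part in parts if part] : a string is truthy iff nonempty
  let student_parts := student_parts.filter (fun p => p != "")
  let correct_parts := correct_parts.filter (fun p => p != "")
  if student_parts.length ≠ correct_parts.length then false
  else PySem.List.sorted student_parts (fun x => x) == PySem.List.sorted correct_parts (fun x => x)

-- ===== PORT B =====
-- B's multiset(answer): one pass over the split pieces, counting the nonempty stripped parts
def pvMultiset (answer : String) : PySem.Dict String Int :=
  ((PySem.Str.split? answer ",").getD []).foldl
    (fun counts part =>
      let part := PySem.Str.strip part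
      if part != "" then counts.insert part (counts.getD part 0 + 1) else counts)
    PySem.Dict.empty

-- Python 'd1 == d2' on dicts, exact: same number of keys and every key of d1 maps to the same value in d2
def pvDictEq (d1 d2 : PySem.Dict String Int) : Bool :=
  d1.size == d2.size && d1.items.all (fun kv => d2.get? kv.1 == some kv.2)

def compare_multiple_answers_alt (student_answer : String) (correct_answer : String) : Bool :=
  pvDictEq (pvMultiset student_answer) (pvMultiset correct_answer)

-- ===== PRECONDITION & SPEC =====
def Spec_compare_multiple_answers (student_answer : String) (correct_answer : String) (out : Bool) : Prop := out = compare_multiple_answers_alt student_answer correct_answer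
instance (student_answer : String) (correct_answer : String) (out : Bool) : Decidable (Spec_compare_multiple_answers student_answer correct_answer out) := by unfold Spec_compare_multiple_answers; infer_instance

-- ===== CLAIM (what is proved, stated in full; the proofs are below) =====
def Claim_equal_compare_multiple_answers : Prop := ∀ (student_answer : String) (correct_answer : String), Dom_compare_multiple_answers student_answer correct_answer → Spec_compare_multiple_answers student_answer correct_answer (compare_multiple_answers student_answer correct_answer)

-- ===== LEMMAS AND PROOFS =====

-- the parsed multiset of parts both programs are about
def pvParts (answer : String) : List String :=
  (((PySem.Str.split? answer ",").getD []).map PySem.Str.strip).filter (fun p => p != "")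

theorem pv_size_eq_keys_length {κ ν : Type} (d : PySem.Dict κ ν) : d.size = d.keys.length := by
  cases d; simp [PySem.Dict.size, PySem.Dict.keys]

theorem pv_multiset_eq_counter (answer : String) :
    pvMultiset answer = PySem.Dict.counter (pvParts answer) := by
  have gen : ∀ (l : List String) (d : PySem.Dict String Int),
      l.foldl (fun counts part =>
        let part := PySem.Str.strip part
        if part != "" then counts.insert part (counts.getD part 0 + 1) else counts) d
      = ((l.map PySem.Str.strip).filter (fun p => p != "")).foldl
          (fun d p => d.insert p (d.getD p 0 + 1)) d := by
    intro l
    induction l with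
    | nil => intro d; rfl
    | cons x xs ih =>
      intro d
      rw [List.foldl_cons, ih, List.map_cons, List.filter_cons]
      by_cases h : (PySem.Str.strip x != "") = true
      · simp only [if_pos h, List.foldl_cons]
      · simp only [if_neg h]
  unfold pvMultiset pvParts
  rw [gen, PySem.Dict.foldl_insert_getD_add_one_eq_counter]

theorem pv_dictEq_counter_iff (s c : List String) :
    pvDictEq (PySem.Dict.counter s) (PySem.Dict.counter c) = true ↔ s.Perm c := by
  constructor
  · intro h
    unfold pvDictEq at h
    rw [Bool.and_eq_true, beq_iff_eq, List.all_eq_true] at h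
    obtain ⟨hsize, hall⟩ := h
    have hget : ∀ k ∈ PySem.Set.ofList s,
        (PySem.Dict.counter c).get? k = some ((s.count k : Int)) := by
      intro k hk
      have := hall (k, (s.count k : Int)) (by
        rw [PySem.Dict.items_counter]
        exact List.mem_map.mpr ⟨k, hk, rfl⟩)
      simpa using this
    have hcount : ∀ k ∈ s, c.count k = s.count k := by
      intro k hk
      have hg := hget k ((PySem.Set.mem_ofList s k).mpr hk)
      have := PySem.Dict.getD_of_get?_eq_some (PySem.Dict.counter c) (0 : Int) hg
      rw [PySem.Dict.getD_counter] at this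
      exact_mod_cast this
    have hsub : PySem.Set.ofList s ⊆ PySem.Set.ofList c := by
      intro k hk
      have hg := hget k hk
      have hc : (PySem.Dict.counter c).contains k = true := by
        rw [PySem.Dict.contains_eq_isSome_get?, hg]; rfl
      rw [PySem.Dict.contains_counter] at hc
      exact (PySem.Set.mem_ofList c k).mpr (by simpa using hc)
    have hlen : (PySem.Set.ofList c).length ≤ (PySem.Set.ofList s).length := by
      rw [pv_size_eq_keys_length, pv_size_eq_keys_length,
        PySem.Dict.keys_counter, PySem.Dict.keys_counter] at hsize
      omega
    have hperm : (PySem.Set.ofList s).Perm (PySem.Set.ofList c) :=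
      ((PySem.Set.nodup_ofList s).subperm hsub).perm_of_length_le hlen
    rw [List.perm_iff_count]
    intro a
    by_cases ha : a ∈ s
    · exact (hcount a ha).symm
    · have has : s.count a = 0 := List.count_eq_zero.mpr ha
      have hac : a ∉ c := by
        intro hac
        exact ha ((PySem.Set.mem_ofList s a).mp
          (hperm.mem_iff.mpr ((PySem.Set.mem_ofList c a).mpr hac)))
      rw [has, List.count_eq_zero.mpr hac]
  · intro h
    have hcount : ∀ a : String, s.count a = c.count a := List.perm_iff_count.mp h
    have hmem : ∀ a : String, a ∈ s ↔ a ∈ c := fun a => h.mem_iff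
    have hperm : (PySem.Set.ofList s).Perm (PySem.Set.ofList c) := by
      rw [List.perm_ext_iff_of_nodup (PySem.Set.nodup_ofList s) (PySem.Set.nodup_ofList c)]
      intro a
      rw [PySem.Set.mem_ofList, PySem.Set.mem_ofList]
      exact hmem a
    unfold pvDictEq
    rw [Bool.and_eq_true, beq_iff_eq, List.all_eq_true]
    constructor
    · rw [pv_size_eq_keys_length, pv_size_eq_keys_length,
        PySem.Dict.keys_counter, PySem.Dict.keys_counter]
      exact hperm.length_eq
    · intro kv hkv
      rw [PySem.Dict.items_counter] at hkv
      obtain ⟨k, hk, rfl⟩ := List.mem_map.mp hkv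
      have hkc : k ∈ c := (hmem k).mp ((PySem.Set.mem_ofList s k).mp hk)
      have hc : (PySem.Dict.counter c).contains k = true := by
        rw [PySem.Dict.contains_counter]; simpa using hkc
      rw [PySem.Dict.contains_eq_isSome_get?] at hc
      obtain ⟨v, hv⟩ := Option.isSome_iff_exists.mp hc
      have := PySem.Dict.getD_of_get?_eq_some (PySem.Dict.counter c) (0 : Int) hv
      rw [PySem.Dict.getD_counter] at this
      rw [beq_iff_eq, hv]
      show some v = some ((List.count k s : Int))
      exact congrArg some (by rw [← this]; exact_mod_cast (hcount k).symm)

theorem pv_A_eq (sa ca : String) :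
    compare_multiple_answers sa ca =
      (if (pvParts sa).length ≠ (pvParts ca).length then false
       else PySem.List.sorted (pvParts sa) (fun x => x) == PySem.List.sorted (pvParts ca) (fun x => x)) := rfl

theorem pv_A_iff (sa ca : String) :
    compare_multiple_answers sa ca = true ↔ (pvParts sa).Perm (pvParts ca) := by
  rw [pv_A_eq]
  constructor
  · intro h
    by_cases hlen : (pvParts sa).length ≠ (pvParts ca).length
    · rw [if_pos hlen] at h
      exact absurd h (by simp)
    · rw [if_neg hlen, beq_iff_eq, PySem.List.sorted_id_eq_sorted_id_iff_perm] at h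
      exact h
  · intro h
    rw [if_neg (by simp [h.length_eq]), beq_iff_eq, PySem.List.sorted_id_eq_sorted_id_iff_perm]
    exact h

theorem pv_B_iff (sa ca : String) :
    compare_multiple_answers_alt sa ca = true ↔ (pvParts sa).Perm (pvParts ca) := by
  unfold compare_multiple_answers_alt
  rw [pv_multiset_eq_counter, pv_multiset_eq_counter]
  exact pv_dictEq_counter_iff _ _

-- ===== VERDICT (by name: the statement is the Claim_ definition above) =====
theorem compare_multiple_answers_spec : Claim_equal_compare_multiple_answers := by
  intro sa ca _
  unfold Spec_compare_multiple_answers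
  have hA := pv_A_iff sa ca
  have hB := pv_B_iff sa ca
  by_cases h : (pvParts sa).Perm (pvParts ca)
  · rw [hA.mpr h, hB.mpr h]
  · rw [Bool.eq_false_iff.mpr (fun hx => h (hA.mp hx)),
        Bool.eq_false_iff.mpr (fun hx => h (hB.mp hx))]
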